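-- pv_equiv track=rewrite | github.com/tiagooandre/FEUP-FPRO | Play/week07/Pairs of complete strings.py | complete_pairs
-- ===== SOURCE A (Python) =====
-- def complete_pairs(s1, s2):
--     alph = set("abcdefghijklmnopqrstuvwxyz")
--     lista_new_words = []
--     complete_words = []
--     for word1 in s1:
--         for word2 in s2:
--             new_word = word1 + word2
--             lista_new_words.append(new_word)
--
--     for words in lista_new_words:
--         if set(words) >= alph:
--             complete_words.append(words)
--
--     return set(complete_words)
-- ===== SOURCE B (Python) =====
-- def complete_pairs(s1, s2):
--     FULL = (1 << 26) - 1
--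
--     def mask(w):
--         m = 0
--         for c in w:
--             if 'a' <= c <= 'z':
--                 m |= 1 << (ord(c) - 97)
--         return m
--
--     masks1 = [mask(w) for w in s1]
--     masks2 = [mask(w) for w in s2]
--     out = set()
--     for w1, m1 in zip(s1, masks1):
--         for w2, m2 in zip(s2, masks2):
--             if m1 | m2 == FULL:
--                 out.add(w1 + w2)
--     return out
-- ===== Notes on version B (the rewrite author's own statement) =====
-- stated objective: faster
-- what changed: Instead of materialising all n*m concatenations and testing 26-letter set inclusion on each concatenated string, B precomputes one 26-bit letter mask per word of each list and admits a pair by a single OR-and-compare, concatenating only the complete pairs.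
import Mathlib
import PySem

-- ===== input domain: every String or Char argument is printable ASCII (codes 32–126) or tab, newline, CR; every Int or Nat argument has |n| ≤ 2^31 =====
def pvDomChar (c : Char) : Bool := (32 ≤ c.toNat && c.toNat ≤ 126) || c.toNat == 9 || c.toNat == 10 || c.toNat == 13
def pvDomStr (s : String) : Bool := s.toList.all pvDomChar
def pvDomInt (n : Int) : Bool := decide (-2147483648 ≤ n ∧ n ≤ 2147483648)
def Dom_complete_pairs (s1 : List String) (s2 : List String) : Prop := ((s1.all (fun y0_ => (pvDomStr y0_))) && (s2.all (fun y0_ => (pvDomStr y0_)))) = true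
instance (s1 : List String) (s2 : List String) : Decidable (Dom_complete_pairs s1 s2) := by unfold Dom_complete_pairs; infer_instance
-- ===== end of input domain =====

-- B replaces A's per-pair 26-letter set-inclusion test on the concatenated string by precomputed
-- per-word 26-bit letter masks combined with a single OR-and-compare per pair (objective: faster).

-- ===== PORT A =====
-- alph = set("abcdefghijklmnopqrstuvwxyz")
def pvAlph : PySem.Set Char := PySem.Set.ofList "abcdefghijklmnopqrstuvwxyz".toList

def complete_pairs (s1 : List String) (s2 : List String) : List String :=
  -- lista_new_words: nested loops appending word1 + word2
  let lista_new_words : List String :=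
    s1.foldl (fun acc word1 =>
      s2.foldl (fun acc word2 =>
        acc ++ [String.ofList (word1.toList ++ word2.toList)]) acc) []
  -- second loop: keep words whose character set contains the alphabet
  let complete_words : List String :=
    lista_new_words.foldl (fun acc words =>
      if PySem.Set.issuperset (PySem.Set.ofList words.toList) pvAlph then acc ++ [words] else acc) []
  PySem.Set.ofList complete_words

-- ===== PORT B =====
-- mask(w): 26-bit letter mask of a word
def pvBits (cs : List Char) : Nat :=
  cs.foldl (fun m c => if 'a' ≤ c ∧ c ≤ 'z' then m ||| (1 <<< (c.toNat - 97)) else m) 0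

def pvMask (w : String) : Nat := pvBits w.toList

def pvFULL : Nat := (1 <<< 26) - 1

def complete_pairs_alt (s1 : List String) (s2 : List String) : List String :=
  let masks1 := s1.map pvMask
  let masks2 := s2.map pvMask
  (s1.zip masks1).foldl (fun out p1 =>
    (s2.zip masks2).foldl (fun out p2 =>
      if p1.2 ||| p2.2 = pvFULL then
        PySem.Set.add out (String.ofList (p1.1.toList ++ p2.1.toList))
      else out) out) []

-- ===== PRECONDITION & SPEC =====
def Spec_complete_pairs (s1 : List String) (s2 : List String) (out : List String) : Prop := out = complete_pairs_alt s1 s2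
instance (s1 : List String) (s2 : List String) (out : List String) : Decidable (Spec_complete_pairs s1 s2 out) := by unfold Spec_complete_pairs; infer_instance

-- ===== CLAIM (what is proved, stated in full; the proofs are below) =====
def Claim_equal_complete_pairs : Prop := ∀ (s1 : List String) (s2 : List String), Dom_complete_pairs s1 s2 → Spec_complete_pairs s1 s2 (complete_pairs s1 s2)

-- ===== LEMMAS AND PROOFS =====

-- the fold of pvBits shifted by a starting accumulator
theorem pvBits_start (cs : List Char) (m : Nat) :
    cs.foldl (fun m c => if 'a' ≤ c ∧ c ≤ 'z' then m ||| (1 <<< (c.toNat - 97)) else m) m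
      = m ||| pvBits cs := by
  induction cs generalizing m with
  | nil => simp [pvBits]
  | cons c cs ih =>
    simp only [pvBits, List.foldl_cons]
    rw [ih, ih]
    split_ifs <;> simp [Nat.or_assoc]

theorem testBit_pvBits (cs : List Char) (i : Nat) :
    (pvBits cs).testBit i = true ↔ ∃ c ∈ cs, ('a' ≤ c ∧ c ≤ 'z') ∧ c.toNat - 97 = i := by
  induction cs with
  | nil => simp [pvBits]
  | cons c cs ih =>
    have h : pvBits (c :: cs)
        = (if 'a' ≤ c ∧ c ≤ 'z' then (0 : Nat) ||| (1 <<< (c.toNat - 97)) else 0) ||| pvBits cs := by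
      simp only [pvBits, List.foldl_cons]
      rw [pvBits_start]
      rfl
    rw [h, Nat.testBit_or]
    simp only [Bool.or_eq_true, ih, List.mem_cons]
    constructor
    · rintro (hbit | ⟨d, hd, hl, hi⟩)
      · by_cases hc : 'a' ≤ c ∧ c ≤ 'z'
        · rw [if_pos hc] at hbit
          simp only [Nat.zero_or, Nat.shiftLeft_eq, one_mul, Nat.testBit_two_pow,
            decide_eq_true_eq] at hbit
          exact ⟨c, Or.inl rfl, hc, by omega⟩
        · simp [hc] at hbit
      · exact ⟨d, Or.inr hd, hl, hi⟩
    · rintro ⟨d, hd | hd, hl, hi⟩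
      · subst hd
        left
        rw [if_pos hl]
        simp [Nat.shiftLeft_eq, one_mul, hi]
      · exact Or.inr ⟨d, hd, hl, hi⟩

theorem lower_toNat {c : Char} (h : 'a' ≤ c ∧ c ≤ 'z') : 97 ≤ c.toNat ∧ c.toNat ≤ 122 :=
  ⟨h.1, h.2⟩

theorem pvAlphList_eq :
    "abcdefghijklmnopqrstuvwxyz".toList = (List.range 26).map (fun i => Char.ofNat (97 + i)) := by
  decide

theorem mem_alph_iff (c : Char) :
    c ∈ "abcdefghijklmnopqrstuvwxyz".toList ↔ ∃ i < 26, c = Char.ofNat (97 + i) := by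
  rw [pvAlphList_eq]
  simp only [List.mem_map, List.mem_range]
  constructor
  · rintro ⟨i, hi, rfl⟩; exact ⟨i, hi, rfl⟩
  · rintro ⟨i, hi, rfl⟩; exact ⟨i, hi, rfl⟩

theorem lower_ofNat {i : Nat} (hi : i < 26) :
    'a' ≤ Char.ofNat (97 + i) ∧ Char.ofNat (97 + i) ≤ 'z' := by
  interval_cases i <;> decide

theorem toNat_ofNat_lower {i : Nat} (hi : i < 26) : (Char.ofNat (97 + i)).toNat = 97 + i := by
  interval_cases i <;> decide

-- the mask is full iff every lowercase letter occurs
theorem pvBits_eq_full_iff (cs : List Char) :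
    pvBits cs = pvFULL ↔ ∀ c ∈ "abcdefghijklmnopqrstuvwxyz".toList, c ∈ cs := by
  constructor
  · intro h c hc
    obtain ⟨i, hi, rfl⟩ := (mem_alph_iff c).1 hc
    have hbit : (pvBits cs).testBit i = true := by
      rw [h, pvFULL, Nat.shiftLeft_eq, one_mul, Nat.testBit_two_pow_sub_one]
      simpa using hi
    obtain ⟨d, hd, hl, hidx⟩ := (testBit_pvBits cs i).1 hbit
    have h97 := lower_toNat hl
    have : d = Char.ofNat (97 + i) := by
      have : d.toNat = 97 + i := by omega
      rw [← this, Char.ofNat_toNat]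
    rwa [← this]
  · intro h
    apply Nat.eq_of_testBit_eq
    intro i
    rw [pvFULL, Nat.shiftLeft_eq, one_mul, Nat.testBit_two_pow_sub_one]
    by_cases hi : i < 26
    · simp only [hi, decide_true]
      rw [testBit_pvBits]
      refine ⟨Char.ofNat (97 + i), h _ ((mem_alph_iff _).2 ⟨i, hi, rfl⟩), lower_ofNat hi, ?_⟩
      rw [toNat_ofNat_lower hi]
      omega
    · simp only [hi, decide_false]
      by_contra hbit
      rw [Bool.not_eq_false, testBit_pvBits] at hbit
      obtain ⟨d, _, hl, hidx⟩ := hbit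
      have := lower_toNat hl
      omega

-- masks OR: bits of a concatenation
theorem pvBits_append (a b : List Char) : pvBits (a ++ b) = pvBits a ||| pvBits b := by
  simp only [pvBits, List.foldl_append]
  rw [pvBits_start]
  rfl

-- A's per-word test equals B's mask test
theorem pred_eq (a b : List Char) :
    PySem.Set.issuperset (PySem.Set.ofList (a ++ b)) pvAlph
      = decide (pvBits a ||| pvBits b = pvFULL) := by
  rcases hd : decide (pvBits a ||| pvBits b = pvFULL) with _ | _
  · simp only [decide_eq_false_iff_not] at hd
    rw [← pvBits_append, pvBits_eq_full_iff] at hd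
    rw [not_forall] at hd
    obtain ⟨c, hc⟩ := hd
    rw [Classical.not_imp] at hc
    obtain ⟨hc, hnc⟩ := hc
    simp only [Bool.eq_false_iff, ne_eq]
    intro hsup
    rw [PySem.Set.issuperset_iff] at hsup
    exact hnc (by simpa [PySem.Set.mem_ofList, pvAlph] using hsup c (by simpa [pvAlph, PySem.Set.mem_ofList] using hc))
  · simp only [decide_eq_true_eq] at hd
    rw [← pvBits_append, pvBits_eq_full_iff] at hd
    rw [PySem.Set.issuperset_iff]
    intro x hx
    simp only [PySem.Set.mem_ofList]
    exact hd x (by simpa [pvAlph, PySem.Set.mem_ofList] using hx)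

-- zip-with-its-own-map folds are plain folds
theorem foldl_zip_map {α β γ : Type} (l : List α) (f : α → β) (g : γ → α × β → γ) (b : γ) :
    ((l.zip (l.map f)).foldl g b) = l.foldl (fun b a => g b (a, f a)) b := by
  induction l generalizing b with
  | nil => rfl
  | cons x xs ih => simp [ih]

-- folding Set.add over a filtered list = conditional adds
theorem foldl_add_filter {α : Type} [BEq α] (l : List α) (p : α → Bool) (acc : PySem.Set α) :
    (l.filter p).foldl PySem.Set.add acc
      = l.foldl (fun out w => if p w then PySem.Set.add out w else out) acc := by
  induction l generalizing acc with
  | nil => rfl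
  | cons x xs ih =>
    rcases h : p x <;> simp [h, ih]

theorem complete_pairs_spec : Claim_equal_complete_pairs := by
  unfold Claim_equal_complete_pairs
  intro s1 s2 _
  unfold Spec_complete_pairs complete_pairs complete_pairs_alt
  simp only [PySem.List.foldl_append_singleton_eq_map,
    PySem.List.foldl_append_eq_flatMap, PySem.List.foldl_append_if_eq_filter, List.nil_append]
  rw [PySem.Set.ofList_eq_foldl, foldl_add_filter, List.foldl_flatMap]
  rw [foldl_zip_map]
  congr 1
  funext out w1
  rw [foldl_zip_map, List.foldl_map]
  congr 1
  funext out w2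
  dsimp only
  rw [String.toList_ofList, pred_eq]
  simp [pvMask]

-- ===== VERDICT (by name: the statement is the Claim_ definition above) =====
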